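-- pv_equiv track=rewrite | github.com/Rishabh1208/BloomBerg | Discuss-problems/23.py | maximumDepth
-- ===== SOURCE A (Python) =====
-- from collections import defaultdict
--
-- def maximumDepth(string):
--     count = 0
--     openSet = set(["(", "{", "["])
--     closeSet = set(["}", "]", ")"])
--     maxCount = 0
--     preMap = defaultdict(list)
--     result = []
--     for ele in string:
--         if ele in openSet:
--             count += 1
--
--             maxCount = max(maxCount, count)
--         elif ele in closeSet:
--             count -= 1
--
--         else:
--             preMap[count].append(ele)
--
--     for key, value in preMap.items():
--         if maxCount == key:
--             result += value
--     return result
-- ===== SOURCE B (Python) =====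
-- def maximumDepth(string):
--     # pass 1: find the maximum bracket-nesting depth
--     count = 0
--     maxCount = 0
--     for ele in string:
--         if ele in "({[":
--             count += 1
--             if count > maxCount:
--                 maxCount = count
--         elif ele in ")}]":
--             count -= 1
--     # pass 2: collect non-bracket characters seen at that depth, in order
--     count = 0
--     result = []
--     for ele in string:
--         if ele in "({[":
--             count += 1
--         elif ele in ")}]":
--             count -= 1
--         elif count == maxCount:
--             result.append(ele)
--     return result
-- ===== Notes on version B (the rewrite author's own statement) =====
-- stated objective: simpler
-- what changed: Replaces the defaultdict grouping of characters by depth (plus a final scan over the map's items) with two plain passes: one computing the maximum depth, one collecting characters whose running depth equals it.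
import Mathlib
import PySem

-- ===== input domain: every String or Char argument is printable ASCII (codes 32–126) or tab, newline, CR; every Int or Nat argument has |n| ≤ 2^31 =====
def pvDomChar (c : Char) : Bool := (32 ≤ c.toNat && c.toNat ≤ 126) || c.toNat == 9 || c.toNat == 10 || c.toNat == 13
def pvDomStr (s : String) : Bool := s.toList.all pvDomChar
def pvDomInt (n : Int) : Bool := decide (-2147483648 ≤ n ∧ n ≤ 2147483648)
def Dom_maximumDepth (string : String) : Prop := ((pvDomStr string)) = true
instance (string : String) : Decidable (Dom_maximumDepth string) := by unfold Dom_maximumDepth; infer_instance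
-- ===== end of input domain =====

-- B replaces A's defaultdict grouping (and final items scan) with two plain depth-tracking passes; objective: simpler.

-- ===== PORT A =====
def maximumDepth (string : String) : List String :=
  let openSet : List String := PySem.Set.ofList ["(", "{", "["]
  let closeSet : List String := PySem.Set.ofList ["}", "]", ")"]
  let st := string.toList.foldl
    (fun (st : Int × Int × PySem.Dict Int (List String)) ch =>
      let ele : String := String.ofList [ch]
      if openSet.contains ele then (st.1 + 1, max st.2.1 (st.1 + 1), st.2.2)
      else if closeSet.contains ele then (st.1 - 1, st.2.1, st.2.2)
      else (st.1, st.2.1, st.2.2.modify st.1 [] (· ++ [ele])))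
    ((0 : Int), (0 : Int), PySem.Dict.empty)
  st.2.2.items.foldl (fun res kv => if st.2.1 == kv.1 then res ++ kv.2 else res) []

-- ===== PORT B =====
def pvIsOpen (ch : Char) : Bool := ch == '(' || ch == '{' || ch == '['
def pvIsClose (ch : Char) : Bool := ch == ')' || ch == '}' || ch == ']'

def maximumDepth_alt (string : String) : List String :=
  let p := string.toList.foldl
    (fun (p : Int × Int) ch =>
      if pvIsOpen ch then (p.1 + 1, if p.1 + 1 > p.2 then p.1 + 1 else p.2)
      else if pvIsClose ch then (p.1 - 1, p.2)
      else p)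
    ((0 : Int), (0 : Int))
  let q := string.toList.foldl
    (fun (q : Int × List String) ch =>
      if pvIsOpen ch then (q.1 + 1, q.2)
      else if pvIsClose ch then (q.1 - 1, q.2)
      else (q.1, if q.1 == p.2 then q.2 ++ [String.ofList [ch]] else q.2))
    ((0 : Int), ([] : List String))
  q.2

-- ===== PRECONDITION & SPEC =====
def Spec_maximumDepth (string : String) (out : List String) : Prop := out = maximumDepth_alt string
instance (string : String) (out : List String) : Decidable (Spec_maximumDepth string out) := by unfold Spec_maximumDepth; infer_instance

-- ===== CLAIM (what is proved, stated in full; the proofs are below) =====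
def Claim_equal_maximumDepth : Prop := ∀ (string : String), Dom_maximumDepth string → Spec_maximumDepth string (maximumDepth string)

-- ===== LEMMAS AND PROOFS =====

-- helper used only by the proofs: the (depth, char) stream of non-bracket characters
def pvPairs : List Char → Int → List (Int × String)
  | [], _ => []
  | ch :: rest, c =>
    if pvIsOpen ch then pvPairs rest (c + 1)
    else if pvIsClose ch then pvPairs rest (c - 1)
    else (c, String.ofList [ch]) :: pvPairs rest c

lemma pvBeq_single (ch c : Char) : (String.ofList [ch] == String.ofList [c]) = (ch == c) := by
  cases h : ch == c <;> simp_all [String.ofList_inj]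

lemma pvOpen_bridge (ch : Char) :
    (PySem.Set.ofList ["(", "{", "["] : List String).contains (String.ofList [ch]) = pvIsOpen ch := by
  rw [show (PySem.Set.ofList ["(", "{", "["] : List String)
        = [String.ofList ['('], String.ofList ['{'], String.ofList ['[']] from by decide]
  simp only [PySem.Set.contains_eq_listContains, List.contains_cons, List.contains_nil,
    Bool.or_false, pvBeq_single, pvIsOpen, Bool.or_assoc]

lemma pvClose_bridge (ch : Char) :
    (PySem.Set.ofList ["}", "]", ")"] : List String).contains (String.ofList [ch]) = pvIsClose ch := by
  rw [show (PySem.Set.ofList ["}", "]", ")"] : List String)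
        = [String.ofList ['}'], String.ofList [']'], String.ofList [')']] from by decide]
  simp only [PySem.Set.contains_eq_listContains, List.contains_cons, List.contains_nil,
    Bool.or_false, pvBeq_single, pvIsClose]
  cases h1 : ch == '}' <;> cases h2 : ch == ']' <;> cases h3 : ch == ')' <;> simp_all

-- abbreviations for the two ports' fold steps (definitionally equal to the lambdas in the ports)
def pvStepA (st : Int × Int × PySem.Dict Int (List String)) (ch : Char) :
    Int × Int × PySem.Dict Int (List String) :=
  if (PySem.Set.ofList ["(", "{", "["] : List String).contains (String.ofList [ch]) then
    (st.1 + 1, max st.2.1 (st.1 + 1), st.2.2)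
  else if (PySem.Set.ofList ["}", "]", ")"] : List String).contains (String.ofList [ch]) then
    (st.1 - 1, st.2.1, st.2.2)
  else (st.1, st.2.1, st.2.2.modify st.1 [] (· ++ [String.ofList [ch]]))

def pvStepB1 (p : Int × Int) (ch : Char) : Int × Int :=
  if pvIsOpen ch then (p.1 + 1, if p.1 + 1 > p.2 then p.1 + 1 else p.2)
  else if pvIsClose ch then (p.1 - 1, p.2)
  else p

def pvStepB2 (M : Int) (q : Int × List String) (ch : Char) : Int × List String :=
  if pvIsOpen ch then (q.1 + 1, q.2)
  else if pvIsClose ch then (q.1 - 1, q.2)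
  else (q.1, if q.1 == M then q.2 ++ [String.ofList [ch]] else q.2)

lemma pvCountMax_agree (l : List Char) (c m : Int) (d : PySem.Dict Int (List String)) :
    (l.foldl pvStepA (c, m, d)).1 = (l.foldl pvStepB1 (c, m)).1 ∧
    (l.foldl pvStepA (c, m, d)).2.1 = (l.foldl pvStepB1 (c, m)).2 := by
  induction l generalizing c m d with
  | nil => exact ⟨rfl, rfl⟩
  | cons ch rest ih =>
    simp only [List.foldl_cons, pvStepA, pvStepB1, pvOpen_bridge ch, pvClose_bridge ch]
    by_cases ho : pvIsOpen ch = true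
    · simp only [ho, if_true]
      have hmax : max m (c + 1) = if c + 1 > m then c + 1 else m := by
        rw [Int.max_def]; split_ifs <;> omega
      rw [hmax]; exact ih _ _ _
    · simp only [ho]
      by_cases hc : pvIsClose ch = true <;> simp only [hc, if_true] <;> exact ih _ _ _

lemma pvDict_agree (l : List Char) (c m : Int) (d : PySem.Dict Int (List String)) :
    (l.foldl pvStepA (c, m, d)).2.2
      = (pvPairs l c).foldl (fun d p => d.modify p.1 [] (· ++ [p.2])) d := by
  induction l generalizing c m d with
  | nil => rfl
  | cons ch rest ih =>
    simp only [List.foldl_cons, pvStepA, pvOpen_bridge ch, pvClose_bridge ch, pvPairs]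
    by_cases ho : pvIsOpen ch = true
    · simp only [ho, if_true]; exact ih _ _ _
    · simp only [ho]
      by_cases hc : pvIsClose ch = true <;>
        simp only [hc, if_true] <;> exact ih _ _ _

lemma pvPass2 (M : Int) (l : List Char) (c : Int) (res : List String) :
    (l.foldl (pvStepB2 M) (c, res)).2
      = res ++ ((pvPairs l c).filter (fun p => p.1 == M)).map Prod.snd := by
  induction l generalizing c res with
  | nil => simp [pvPairs]
  | cons ch rest ih =>
    simp only [List.foldl_cons, pvStepB2, pvPairs]
    by_cases ho : pvIsOpen ch = true
    · simp [ho, ih]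
    · by_cases hc : pvIsClose ch = true
      · simp [ho, hc, ih]
      · by_cases hM : (c == M) = true
        · simp [ho, hc, hM, ih]
        · simp [ho, hc, hM, ih]

lemma pvItems_fold (M : Int) (its : List (Int × List String)) (res : List String) :
    its.foldl (fun res kv => if M == kv.1 then res ++ kv.2 else res) res
      = res ++ ((its.filter (fun kv => M == kv.1)).map Prod.snd).flatten := by
  induction its generalizing res with
  | nil => simp
  | cons kv rest ih =>
    simp only [List.foldl_cons, List.filter_cons]
    by_cases h : (M == kv.1) = true
    · simp only [h, if_true, ih, List.map_cons, List.flatten_cons, List.append_assoc]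
    · rw [if_neg h, if_neg h]; exact ih res

lemma pvFilter_flatten_eq_getD (M : Int) (d : PySem.Dict Int (List String))
    (h : d.keys.Nodup) :
    ((d.items.filter (fun kv => M == kv.1)).map Prod.snd).flatten = d.getD M [] := by
  obtain ⟨its⟩ := d
  induction its with
  | nil => simp [PySem.Dict.getD, PySem.Dict.get?]
  | cons kv rest ih =>
    obtain ⟨k, v⟩ := kv
    simp only [PySem.Dict.keys] at h ih
    simp only [] at ih ⊢
    have hnd : (rest.map Prod.fst).Nodup := by
      simp only [List.map_cons, List.nodup_cons] at h; exact h.2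
    have hk : k ∉ rest.map Prod.fst := by
      simp only [List.map_cons, List.nodup_cons] at h; exact h.1
    rw [PySem.Dict.getD_eq_get?_getD, PySem.Dict.get?_mk_cons]
    by_cases hM : (M == k) = true
    · have hMk : M = k := by simpa using hM
      have hke : (k == M) = true := by simp [hMk]
      rw [hke, if_pos rfl]
      simp only [List.filter_cons, hM, if_true, List.map_cons, List.flatten_cons]
      have hrest : rest.filter (fun kv => M == kv.1) = [] := by
        rw [List.filter_eq_nil_iff]
        intro kv hkv
        have hmem : kv.1 ∈ rest.map Prod.fst := List.mem_map_of_mem hkv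
        simp only [beq_iff_eq]
        intro hcon
        apply hk
        rw [hMk] at hcon
        rw [hcon]
        exact hmem
      rw [hrest]; simp
    · have hke : (k == M) = false := by
        cases hkk : k == M
        · rfl
        · exfalso; apply hM; simp_all [BEq.comm]
      rw [hke]
      simp only [Bool.false_eq_true, if_false, List.filter_cons, hM, Bool.false_eq_true,
        if_false]
      rw [← PySem.Dict.getD_eq_get?_getD]
      exact ih hnd

-- ===== VERDICT (by name: the statement is the Claim_ definition above) =====
theorem maximumDepth_spec : Claim_equal_maximumDepth := by
  intro s _
  unfold Spec_maximumDepth maximumDepth maximumDepth_alt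
  show ((s.toList.foldl pvStepA (0, 0, PySem.Dict.empty)).2.2.items.foldl
      (fun res kv => if (s.toList.foldl pvStepA (0, 0, PySem.Dict.empty)).2.1 == kv.1
        then res ++ kv.2 else res) [])
    = (s.toList.foldl (pvStepB2 (s.toList.foldl pvStepB1 (0, 0)).2) (0, [])).2
  rw [pvItems_fold, pvPass2]
  have hM := (pvCountMax_agree s.toList 0 0 PySem.Dict.empty).2
  have hnd : (s.toList.foldl pvStepA (0, 0, PySem.Dict.empty)).2.2.keys.Nodup := by
    rw [pvDict_agree]
    exact PySem.Dict.nodup_keys_foldl_modify_key _ Prod.fst [] (fun _ p => (· ++ [p.2])) _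
      PySem.Dict.nodup_keys_empty
  rw [List.nil_append, List.nil_append, pvFilter_flatten_eq_getD _ _ hnd, pvDict_agree,
    PySem.Dict.getD_foldl_modify_append, PySem.Dict.getD_empty, List.nil_append, hM]
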